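-- pv_equiv track=rewrite | github.com/zia1138/CO-Bench | agents/reevo.py | filter_traceback
-- ===== SOURCE A (Python) =====
-- def filter_traceback(s):
--     """Extract traceback from stdout."""
--     lines = s.split('\n')
--     filtered_lines = []
--     for i, line in enumerate(lines):
--         if line.startswith('Traceback'):
--             for j in range(i, len(lines)):
--                 filtered_lines.append(lines[j])
--             return '\n'.join(filtered_lines)
--     return ''  # Return an empty string if no Traceback is found
-- ===== SOURCE B (Python) =====
-- def filter_traceback(s):
--     """Extract traceback from stdout."""
--     if s.startswith('Traceback'):
--         return s
--     idx = s.find('\nTraceback')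
--     if idx != -1:
--         return s[idx + 1:]
--     return ''
-- ===== Notes on version B (the rewrite author's own statement) =====
-- stated objective: idiomatic
-- what changed: Instead of splitting the string into a list of lines, scanning them with an indexed loop and re-joining the suffix line list, B does one raw-string search: a startswith check for a match at position 0, else a single find of newline-then-marker and a slice of the suffix after that newline.
import Mathlib
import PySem

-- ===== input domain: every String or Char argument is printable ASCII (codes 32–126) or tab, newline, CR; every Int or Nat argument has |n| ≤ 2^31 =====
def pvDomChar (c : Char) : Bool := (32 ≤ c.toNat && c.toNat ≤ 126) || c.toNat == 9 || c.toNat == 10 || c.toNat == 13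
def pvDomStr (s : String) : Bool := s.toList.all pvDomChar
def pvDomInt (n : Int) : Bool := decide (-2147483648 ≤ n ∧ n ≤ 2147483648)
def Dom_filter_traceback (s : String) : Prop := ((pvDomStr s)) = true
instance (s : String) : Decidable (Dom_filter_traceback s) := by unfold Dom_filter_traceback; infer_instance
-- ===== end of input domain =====

-- B replaces A's split-into-lines / indexed scan / re-join with one raw-string search
-- (startswith at position 0, else find '\nTraceback' and slice the suffix); same return value.

-- ===== PORT A =====
-- the 'for i, line in enumerate(lines)' loop; on a match the inner
-- 'for j in range(i, len(lines)): filtered_lines.append(lines[j])' loop then the join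
def ftA_loop (lines : List String) : List (Int × String) → String
  | [] => ""                        -- loop fell through: return ''
  | (i, line) :: rest =>
    if PySem.Str.startswith line "Traceback" then
      let filtered_lines :=
        (PySem.List.pyRange i (PySem.List.len lines) 1).foldl
          (fun acc j => acc ++ [PySem.List.pyGetD lines j ""]) []
      PySem.Str.join "\n" filtered_lines
    else ftA_loop lines rest

def filter_traceback (s : String) : String :=
  let lines := (PySem.Str.split? s "\n").getD []   -- s.split('\n'); sep ≠ '' so always some
  ftA_loop lines (PySem.List.enumerate lines 0)

-- ===== PORT B =====
def filter_traceback_alt (s : String) : String :=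
  if PySem.Str.startswith s "Traceback" then s
  else
    let idx := PySem.Str.find s "\nTraceback"
    if idx ≠ -1 then PySem.Str.slice s (some (idx + 1)) none else ""

-- ===== PRECONDITION & SPEC =====
def Spec_filter_traceback (s : String) (out : String) : Prop := out = filter_traceback_alt s
instance (s : String) (out : String) : Decidable (Spec_filter_traceback s out) := by unfold Spec_filter_traceback; infer_instance

-- ===== CLAIM (what is proved, stated in full; the proofs are below) =====
def Claim_equal_filter_traceback : Prop := ∀ (s : String), Dom_filter_traceback s → Spec_filter_traceback s (filter_traceback s)

-- ===== LEMMAS AND PROOFS =====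

-- the literal "Traceback" as a char list
def TB : List Char := ['T', 'r', 'a', 'c', 'e', 'b', 'a', 'c', 'k']

set_option maxRecDepth 16384 in
theorem tb_toList : "Traceback".toList = TB := by decide

set_option maxRecDepth 16384 in
theorem ntb_toList : "\nTraceback".toList = '\n' :: TB := by decide

theorem tb_no_nl : ∀ c ∈ TB, c ≠ '\n' := by
  intro c hc hn
  subst hn
  simp [TB] at hc

-- single-char split, structurally
def mySplit : List Char → List (List Char)
  | [] => [[]]
  | a :: rest =>
    if a = '\n' then [] :: mySplit rest
    else (a :: (mySplit rest).headI) :: (mySplit rest).tail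

theorem mySplit_cons_nl (rest : List Char) : mySplit ('\n' :: rest) = [] :: mySplit rest := by
  simp [mySplit]

theorem mySplit_cons_other (a : Char) (rest : List Char) (ha : a ≠ '\n') :
    mySplit (a :: rest) = (a :: (mySplit rest).headI) :: (mySplit rest).tail := by
  simp [mySplit, ha]

-- A's scan over the line list
def aRes : List (List Char) → List Char
  | [] => []
  | l :: ls =>
    if TB <+: l then PySem.Chars.join ['\n'] (l :: ls) else aRes ls

def ref (cs : List Char) : List Char := aRes (mySplit cs)

def refAux (cs : List Char) : List Char :=
  match cs.dropWhile (· ≠ '\n') with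
  | [] => []
  | _ :: r => ref r

def bAux (cs : List Char) : List Char :=
  if PySem.Chars.find cs ('\n' :: TB) = -1 then []
  else cs.drop ((PySem.Chars.find cs ('\n' :: TB)).toNat + 1)

theorem mySplit_ne_nil (cs : List Char) : mySplit cs ≠ [] := by
  cases cs with
  | nil => simp [mySplit]
  | cons a rest => simp only [mySplit]; split <;> simp

theorem splitOn_go_spec (fuel : Nat) (l cur : List Char) (acc : List (List Char))
    (h : l.length ≤ fuel) :
    PySem.Chars.splitOn.go ['\n'] fuel l cur acc
      = acc.reverse ++ (mySplit l).modifyHead (cur.reverse ++ ·) := by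
  induction l generalizing fuel cur acc with
  | nil =>
    cases fuel <;> simp [PySem.Chars.splitOn.go, mySplit]
  | cons a rest ih =>
    cases fuel with
    | zero => simp at h
    | succ f =>
      by_cases ha : a = '\n'
      · subst ha
        have hstep : PySem.Chars.splitOn.go ['\n'] (f+1) ('\n' :: rest) cur acc
            = PySem.Chars.splitOn.go ['\n'] f rest [] (cur.reverse :: acc) := by
          simp [PySem.Chars.splitOn.go, List.isPrefixOf]
        rw [hstep, ih f [] (cur.reverse :: acc) (by simpa using Nat.le_of_succ_le_succ h)]
        rw [mySplit_cons_nl]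
        cases hs : mySplit rest with
        | nil => exact absurd hs (mySplit_ne_nil rest)
        | cons x xs => simp
      · have hstep : PySem.Chars.splitOn.go ['\n'] (f+1) (a :: rest) cur acc
            = PySem.Chars.splitOn.go ['\n'] f rest (a :: cur) acc := by
          simp only [PySem.Chars.splitOn.go]
          rw [if_neg (by
            rw [List.isPrefixOf_iff_prefix]
            intro hc
            exact ha ((List.cons_prefix_cons.mp hc).1.symm))]
        rw [hstep, ih f (a :: cur) acc (by simpa using Nat.le_of_succ_le_succ h)]
        rw [mySplit_cons_other a rest ha]
        cases hs : mySplit rest with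
        | nil => exact absurd hs (mySplit_ne_nil rest)
        | cons x xs => simp

theorem splitOn_eq_mySplit (cs : List Char) :
    PySem.Chars.splitOn cs ['\n'] = mySplit cs := by
  unfold PySem.Chars.splitOn
  rw [splitOn_go_spec (cs.length + 1) cs [] [] (by omega)]
  cases hs : mySplit cs with
  | nil => exact absurd hs (mySplit_ne_nil cs)
  | cons x xs => simp

theorem join_mySplit (cs : List Char) :
    PySem.Chars.join ['\n'] (mySplit cs) = cs := by
  induction cs with
  | nil => simp [mySplit, PySem.Chars.join, List.intercalate]
  | cons a rest ih =>
    by_cases ha : a = '\n'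
    · subst ha
      rw [mySplit_cons_nl]
      cases hs : mySplit rest with
      | nil => exact absurd hs (mySplit_ne_nil rest)
      | cons x xs =>
        rw [hs] at ih
        rw [PySem.Chars.join_cons_cons, ih]
        rfl
    · rw [mySplit_cons_other a rest ha]
      cases hs : mySplit rest with
      | nil => exact absurd hs (mySplit_ne_nil rest)
      | cons x xs =>
        rw [hs] at ih
        simp only [List.headI, List.tail]
        cases xs with
        | nil =>
          rw [PySem.Chars.join_singleton]
          rw [PySem.Chars.join_singleton] at ih
          rw [ih]
        | cons y ys =>
          rw [PySem.Chars.join_cons_cons]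
          rw [PySem.Chars.join_cons_cons] at ih
          rw [List.cons_append, List.cons_append, ih]

theorem prefix_headI_of_no_nl (u : List Char) (hu : ∀ c ∈ u, c ≠ '\n') :
    ∀ cs : List Char, u <+: cs → u <+: (mySplit cs).headI := by
  induction u with
  | nil => intro cs _; simp
  | cons x u' ih =>
    intro cs hpre
    cases cs with
    | nil => simp at hpre
    | cons a rest =>
      obtain ⟨hx, hrest⟩ := List.cons_prefix_cons.mp hpre
      subst hx
      have hxn : x ≠ '\n' := hu x (by simp)
      rw [mySplit_cons_other x rest hxn]
      simp only [List.headI]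
      exact List.cons_prefix_cons.mpr ⟨rfl, ih (fun c hc => hu c (by simp [hc])) rest hrest⟩

theorem mySplit_no_nl_append (l0 : List Char) (rest : List Char)
    (h : ∀ c ∈ l0, c ≠ '\n') :
    mySplit (l0 ++ '\n' :: rest) = l0 :: mySplit rest := by
  induction l0 with
  | nil => simp [mySplit]
  | cons a l0' ih =>
    have ha : a ≠ '\n' := h a (by simp)
    simp only [List.cons_append, mySplit, if_neg ha,
      ih (fun c hc => h c (by simp [hc])), List.headI, List.tail]

theorem mySplit_no_nl (cs : List Char) (h : ∀ c ∈ cs, c ≠ '\n') :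
    mySplit cs = [cs] := by
  induction cs with
  | nil => simp [mySplit]
  | cons a rest ih =>
    have ha : a ≠ '\n' := h a (by simp)
    simp [mySplit, if_neg ha, ih (fun c hc => h c (by simp [hc]))]

theorem dropWhile_head_not {p : Char → Bool} :
    ∀ (cs : List Char) (d : Char) (r : List Char), cs.dropWhile p = d :: r → p d = false := by
  intro cs
  induction cs with
  | nil => intro d r h; simp at h
  | cons a t ih =>
    intro d r h
    by_cases hp : p a
    · rw [List.dropWhile_cons_of_pos hp] at h
      exact ih d r h
    · rw [List.dropWhile_cons_of_neg hp] at h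
      cases h
      simpa using hp

theorem ref_of_prefix (cs : List Char) (h : TB <+: cs) : ref cs = cs := by
  have hh := prefix_headI_of_no_nl TB tb_no_nl cs h
  unfold ref
  cases hs : mySplit cs with
  | nil => exact absurd hs (mySplit_ne_nil cs)
  | cons x xs =>
    rw [hs] at hh
    simp only [List.headI] at hh
    have : aRes (x :: xs) = PySem.Chars.join ['\n'] (x :: xs) := by
      unfold aRes; rw [if_pos hh]
    rw [this, ← hs, join_mySplit]

theorem ref_of_not_prefix (cs : List Char) (h : ¬ TB <+: cs) :
    ref cs = refAux cs := by
  by_cases hnl : '\n' ∈ cs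
  · obtain ⟨l0, rest, hl0, hcs⟩ :
        ∃ l0 rest, (∀ c ∈ l0, c ≠ '\n') ∧ cs = l0 ++ '\n' :: rest := by
      refine ⟨cs.takeWhile (· ≠ '\n'), (cs.dropWhile (· ≠ '\n')).tail, ?_, ?_⟩
      · intro c hc
        simpa using List.mem_takeWhile_imp hc
      · have hd : cs.dropWhile (· ≠ '\n') ≠ [] := by
          intro h0
          have h1 := List.dropWhile_eq_nil_iff.mp h0 '\n' hnl
          simp at h1
        cases hdw : cs.dropWhile (· ≠ '\n') with
        | nil => exact absurd hdw hd
        | cons d r =>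
          have hdnl : d = '\n' := by
            have := dropWhile_head_not cs d r hdw
            simpa using this
          subst hdnl
          conv_lhs => rw [← List.takeWhile_append_dropWhile (p := fun x => decide (x ≠ '\n')) (l := cs)]
          rw [hdw]
          simp
    subst hcs
    have hfirst : ¬ TB <+: l0 := by
      intro hpre
      exact h (hpre.trans (List.prefix_append _ _))
    have hdw : (l0 ++ '\n' :: rest).dropWhile (· ≠ '\n') = '\n' :: rest := by
      rw [List.dropWhile_append]
      simp only [List.isEmpty_iff]
      rw [List.dropWhile_eq_nil_iff.mpr (by intro x hx; simpa using hl0 x hx)]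
      simp
    unfold refAux
    rw [hdw]
    show ref (l0 ++ '\n' :: rest) = ref rest
    unfold ref
    rw [mySplit_no_nl_append l0 rest hl0]
    show (if TB <+: l0 then PySem.Chars.join ['\n'] (l0 :: mySplit rest) else aRes (mySplit rest))
        = aRes (mySplit rest)
    rw [if_neg hfirst]
  · have hcs : ∀ c ∈ cs, c ≠ '\n' := fun c hc hcn => hnl (hcn ▸ hc)
    unfold ref refAux
    rw [mySplit_no_nl cs hcs]
    rw [List.dropWhile_eq_nil_iff.mpr (by intro x hx; simpa using hcs x hx)]
    show (if TB <+: cs then PySem.Chars.join ['\n'] [cs] else aRes []) = []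
    rw [if_neg h]
    rfl

-- find on a cons cell, via the first-occurrence characterization (no induction over find.go)
theorem find_cons_not_prefix (a : Char) (rest sub : List Char)
    (h : ¬ sub <+: (a :: rest)) :
    PySem.Chars.find (a :: rest) sub
      = if PySem.Chars.find rest sub = -1 then -1 else PySem.Chars.find rest sub + 1 := by
  by_cases hr : PySem.Chars.find rest sub = -1
  · rw [if_pos hr]
    rw [PySem.Chars.find_eq_neg_one_iff] at hr ⊢
    intro hinf
    rcases List.infix_cons_iff.mp hinf with hpre | hinf'
    · exact h hpre
    · exact hr hinf'
  · rw [if_neg hr]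
    have h0 : 0 ≤ PySem.Chars.find rest sub := by
      have := PySem.Chars.neg_one_le_find rest sub
      omega
    obtain ⟨hp, hmin⟩ := PySem.Chars.find_spec (s := rest) (sub := sub) h0
    have hc0 : 0 ≤ PySem.Chars.find (a :: rest) sub := by
      rw [PySem.Chars.find_nonneg_iff]
      obtain ⟨u, hu⟩ := hp
      refine List.infix_cons ⟨rest.take (PySem.Chars.find rest sub).toNat, u, ?_⟩
      rw [List.append_assoc, hu, List.take_append_drop]

    obtain ⟨hpc, hminc⟩ := PySem.Chars.find_spec (s := a :: rest) (sub := sub) hc0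
    have hne0 : (PySem.Chars.find (a :: rest) sub).toNat ≠ 0 := by
      intro h0'
      rw [h0'] at hpc
      exact h (by simpa using hpc)
    have hdrop : ∀ k : Nat, (a :: rest).drop (k + 1) = rest.drop k := by intro k; simp
    have hle1 : (PySem.Chars.find (a :: rest) sub).toNat ≤ (PySem.Chars.find rest sub).toNat + 1 := by
      by_contra hgt
      have hbad := hminc ((PySem.Chars.find rest sub).toNat + 1) (by omega)
      rw [hdrop] at hbad
      exact hbad hp
    have hge1 : (PySem.Chars.find rest sub).toNat + 1 ≤ (PySem.Chars.find (a :: rest) sub).toNat := by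
      by_contra hgt
      have hk : (PySem.Chars.find (a :: rest) sub).toNat - 1 < (PySem.Chars.find rest sub).toNat := by omega
      have hbad := hmin _ hk
      rw [← hdrop] at hbad
      have hrw : (PySem.Chars.find (a :: rest) sub).toNat - 1 + 1 = (PySem.Chars.find (a :: rest) sub).toNat := by omega
      rw [hrw] at hbad
      exact hbad hpc
    omega

theorem find_of_prefix (s sub : List Char) (h : sub <+: s) :
    PySem.Chars.find s sub = 0 := by
  have h0 : 0 ≤ PySem.Chars.find s sub := by
    rw [PySem.Chars.find_nonneg_iff]
    obtain ⟨u, hu⟩ := h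
    exact ⟨[], u, by simpa using hu⟩
  obtain ⟨_, hmin⟩ := PySem.Chars.find_spec (s := s) (sub := sub) h0
  by_contra hne
  exact hmin 0 (by omega) (by simpa using h)

theorem bAux_cons (a : Char) (rest : List Char)
    (hnp : ¬ ('\n' :: TB) <+: (a :: rest)) : bAux (a :: rest) = bAux rest := by
  unfold bAux
  rw [find_cons_not_prefix _ _ _ hnp]
  by_cases hr : PySem.Chars.find rest ('\n' :: TB) = -1
  · simp [hr]
  · have h0 : 0 ≤ PySem.Chars.find rest ('\n' :: TB) := by
      have := PySem.Chars.neg_one_le_find rest ('\n' :: TB)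
      omega
    rw [if_neg hr]
    rw [if_neg (show ¬(PySem.Chars.find rest ('\n' :: TB) + 1 = -1) by omega)]
    rw [if_neg hr]
    have htn : (PySem.Chars.find rest ('\n' :: TB) + 1).toNat
        = (PySem.Chars.find rest ('\n' :: TB)).toNat + 1 := by omega
    rw [htn, List.drop_succ_cons]

theorem bAux_eq_refAux (cs : List Char) : bAux cs = refAux cs := by
  induction cs with
  | nil =>
    unfold bAux refAux
    rw [(PySem.Chars.find_eq_neg_one_iff [] ('\n' :: TB)).mpr (by simp)]
    simp
  | cons a rest ih =>
    by_cases ha : a = '\n'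
    · subst ha
      by_cases hT : TB <+: rest
      · have hpre : ('\n' :: TB) <+: ('\n' :: rest) :=
          List.cons_prefix_cons.mpr ⟨rfl, hT⟩
        unfold bAux refAux
        rw [find_of_prefix _ _ hpre]
        rw [if_neg (by omega)]
        rw [List.dropWhile_cons_of_neg (by simp)]
        simp only [Int.toNat_zero, Nat.zero_add, List.drop_succ_cons, List.drop_zero]
        exact (ref_of_prefix rest hT).symm
      · have hnp : ¬ ('\n' :: TB) <+: ('\n' :: rest) := by
          intro hpre
          exact hT (List.cons_prefix_cons.mp hpre).2
        calc bAux ('\n' :: rest) = bAux rest := bAux_cons _ _ hnp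
          _ = refAux rest := ih
          _ = ref rest := (ref_of_not_prefix rest hT).symm
          _ = refAux ('\n' :: rest) := by
              unfold refAux
              rw [List.dropWhile_cons_of_neg (by simp)]
    · have hnp : ¬ ('\n' :: TB) <+: (a :: rest) := by
        intro hpre
        exact ha ((List.cons_prefix_cons.mp hpre).1.symm)
      calc bAux (a :: rest) = bAux rest := bAux_cons _ _ hnp
        _ = refAux rest := ih
        _ = refAux (a :: rest) := by
            unfold refAux
            rw [List.dropWhile_cons_of_pos (by simpa using ha)]

-- B's port computes ref
theorem alt_toList (s : String) : (filter_traceback_alt s).toList = ref s.toList := by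
  unfold filter_traceback_alt
  by_cases hT : TB <+: s.toList
  · rw [if_pos (by
      rw [PySem.Str.startswith_eq, tb_toList]
      exact (PySem.Chars.startswith_iff _ _).mpr hT)]
    exact (ref_of_prefix _ hT).symm
  · rw [if_neg (by
      rw [PySem.Str.startswith_eq, tb_toList]
      intro hc
      exact hT ((PySem.Chars.startswith_iff _ _).mp hc))]
    rw [ref_of_not_prefix _ hT, ← bAux_eq_refAux]
    simp only [PySem.Str.find_eq, ntb_toList]
    by_cases hr : PySem.Chars.find s.toList ('\n' :: TB) = -1
    · rw [if_neg (by simpa using hr)]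
      unfold bAux
      rw [if_pos hr]
      rfl
    · rw [if_pos (by simpa using hr)]
      rw [PySem.Str.toList_slice]
      have h0 : 0 ≤ PySem.Chars.find s.toList ('\n' :: TB) := by
        have := PySem.Chars.neg_one_le_find s.toList ('\n' :: TB)
        omega
      rw [PySem.Chars.slice_eq_listSlice]
      rw [PySem.List.slice_from _ (by omega)]
      unfold bAux
      rw [if_neg hr]
      congr 1
      omega

-- A's scan at String level
def aResS : List String → String
  | [] => ""
  | l :: ls =>
    if PySem.Str.startswith l "Traceback" then PySem.Str.join "\n" (l :: ls) else aResS ls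

theorem ftA_loop_spec (lines : List String) :
    ∀ (ls : List String) (k : Nat), lines.drop k = ls →
      ftA_loop lines (PySem.List.enumerate ls (k : Int)) = aResS ls := by
  intro ls
  induction ls with
  | nil => intro k _; simp [PySem.List.enumerate_nil, ftA_loop, aResS]
  | cons l ls' ih =>
    intro k hk
    rw [PySem.List.enumerate_cons]
    unfold ftA_loop
    by_cases hs : PySem.Str.startswith l "Traceback"
    · rw [if_pos hs]
      unfold aResS
      rw [if_pos hs]
      rw [PySem.List.foldl_append_singleton_eq_map]
      rw [PySem.List.map_pyGetD_pyRange lines "" (a := (k : Int)) (by omega)]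
      rw [Int.toNat_natCast, hk]
      simp
    · rw [if_neg hs]
      unfold aResS
      rw [if_neg hs]
      have hdrop : lines.drop (k + 1) = ls' := by
        rw [← List.tail_drop, hk]
        rfl
      have hcast : (k : Int) + 1 = ((k + 1 : Nat) : Int) := by push_cast; ring
      rw [hcast]
      exact ih (k + 1) hdrop

theorem aResS_toList (ls : List String) :
    (aResS ls).toList = aRes (ls.map String.toList) := by
  induction ls with
  | nil => simp [aResS, aRes]
  | cons l ls' ih =>
    rw [List.map_cons]
    unfold aResS aRes
    by_cases hs : TB <+: l.toList
    · rw [if_pos (by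
        rw [PySem.Str.startswith_eq, tb_toList]
        exact (PySem.Chars.startswith_iff _ _).mpr hs),
        if_pos hs]
      rw [PySem.Str.toList_join]
      rfl
    · rw [if_neg (by
        rw [PySem.Str.startswith_eq, tb_toList]
        intro hc
        exact hs ((PySem.Chars.startswith_iff _ _).mp hc)), if_neg hs]
      exact ih

theorem a_toList (s : String) : (filter_traceback s).toList = ref s.toList := by
  unfold filter_traceback
  have hlines : ((PySem.Str.split? s "\n").getD []).map String.toList
      = mySplit s.toList := by
    have hmap := PySem.Str.split?_map s "\n"
    unfold PySem.Chars.split? at hmap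
    rw [if_neg (by decide)] at hmap
    rw [show ("\n".toList) = ['\n'] from rfl] at hmap
    rw [splitOn_eq_mySplit] at hmap
    cases hsp : PySem.Str.split? s "\n" with
    | none => rw [hsp] at hmap; simp at hmap
    | some v =>
      rw [hsp] at hmap
      simpa using hmap
  show (ftA_loop ((PySem.Str.split? s "\n").getD [])
      (PySem.List.enumerate ((PySem.Str.split? s "\n").getD []) 0)).toList = ref s.toList
  rw [show (0 : Int) = ((0 : Nat) : Int) from rfl]
  rw [ftA_loop_spec _ _ 0 (by simp), aResS_toList, hlines]
  rfl

-- ===== VERDICT (by name: the statement is the Claim_ definition above) =====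
theorem filter_traceback_spec : Claim_equal_filter_traceback := by
  intro s _
  unfold Spec_filter_traceback
  apply String.toList_inj.mp
  rw [a_toList, alt_toList]
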